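-- pv_equiv track=rewrite | github.com/Minbu5/TrainSeat | trainseat/src/trainseat/app.py | seat_position
-- ===== SOURCE A (Python) =====
-- def seat_position(seat=1):
--     window_seats = []
--     for num in range(1, 55):
--         if num % 6 == 0:
--             window_seats.append(num - 5)
--             window_seats.append(num)
--
--     middle_seats = []
--     for num in range(1, 55):
--         if (num - 2) % 3 == 0:
--             middle_seats.append(num)
--     edge_seats = []
--     for num in range(3, 55, 6):
--         edge_seats.append(num)
--         edge_seats.append(num + 1)
--
--     if seat in window_seats:
--         return "You have window seat"
--     elif seat in middle_seats:
--         return "You have middle seat"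
--     elif seat in edge_seats:
--         return "You have edge seat"
--     else:
--        return "Wrong number. Check your seat number on the ticket."
-- ===== SOURCE B (Python) =====
-- def seat_position(seat=1):
--     try:
--         in_range = 1 <= seat <= 54
--     except TypeError:
--         in_range = False
--     if in_range:
--         r = seat % 6
--         if r in (0, 1):
--             return "You have window seat"
--         if r in (2, 5):
--             return "You have middle seat"
--         if r in (3, 4):
--             return "You have edge seat"
--     return "Wrong number. Check your seat number on the ticket."
-- ===== Notes on version B (the rewrite author's own statement) =====
-- stated objective: simpler
-- what changed: Replaced the three list-building loops and the membership chain by a direct modular classification: guard 1<=seat<=54 and dispatch on seat % 6.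
import Mathlib
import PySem

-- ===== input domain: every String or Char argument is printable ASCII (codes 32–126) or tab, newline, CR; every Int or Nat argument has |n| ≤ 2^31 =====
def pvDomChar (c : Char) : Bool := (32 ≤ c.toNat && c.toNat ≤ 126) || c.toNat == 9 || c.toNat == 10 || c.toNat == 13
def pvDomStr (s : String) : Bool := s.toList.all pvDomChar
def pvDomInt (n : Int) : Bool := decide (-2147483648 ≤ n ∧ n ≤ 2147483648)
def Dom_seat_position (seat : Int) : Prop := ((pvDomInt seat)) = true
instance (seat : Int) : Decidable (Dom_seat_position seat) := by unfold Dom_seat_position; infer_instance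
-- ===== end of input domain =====

-- B replaces A's three list-building loops and membership chain by a direct
-- range guard plus seat % 6 dispatch (simpler).


-- ===== PORT A =====
def pvWindowSeats : List Int :=
  (PySem.List.pyRange 1 55 1).foldl
    (fun acc num => if PySem.Int.mod num 6 == 0 then acc ++ [num - 5, num] else acc) []

def pvMiddleSeats : List Int :=
  (PySem.List.pyRange 1 55 1).foldl
    (fun acc num => if PySem.Int.mod (num - 2) 3 == 0 then acc ++ [num] else acc) []

def pvEdgeSeats : List Int :=
  (PySem.List.pyRange 3 55 6).foldl (fun acc num => acc ++ [num, num + 1]) []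

def seat_position (seat : Int) : String :=
  if pvWindowSeats.contains seat then "You have window seat"
  else if pvMiddleSeats.contains seat then "You have middle seat"
  else if pvEdgeSeats.contains seat then "You have edge seat"
  else "Wrong number. Check your seat number on the ticket."

-- ===== PORT B =====
def seat_position_alt (seat : Int) : String :=
  if 1 ≤ seat ∧ seat ≤ 54 then
    let r := PySem.Int.mod seat 6
    if r == 0 || r == 1 then "You have window seat"
    else if r == 2 || r == 5 then "You have middle seat"
    else if r == 3 || r == 4 then "You have edge seat"
    else "Wrong number. Check your seat number on the ticket."
  else "Wrong number. Check your seat number on the ticket."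

-- ===== PRECONDITION & SPEC =====
def Spec_seat_position (seat : Int) (out : String) : Prop := out = seat_position_alt seat
instance (seat : Int) (out : String) : Decidable (Spec_seat_position seat out) := by unfold Spec_seat_position; infer_instance

-- ===== CLAIM (what is proved, stated in full; the proofs are below) =====
def Claim_equal_seat_position : Prop := ∀ (seat : Int), Dom_seat_position seat → Spec_seat_position seat (seat_position seat)

-- ===== LEMMAS AND PROOFS =====
theorem pvWindowSeats_eq :
    pvWindowSeats = [1, 6, 7, 12, 13, 18, 19, 24, 25, 30, 31, 36, 37, 42, 43, 48, 49, 54] := by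
  decide

theorem pvMiddleSeats_eq :
    pvMiddleSeats = [2, 5, 8, 11, 14, 17, 20, 23, 26, 29, 32, 35, 38, 41, 44, 47, 50, 53] := by
  decide

theorem pvEdgeSeats_eq :
    pvEdgeSeats = [3, 4, 9, 10, 15, 16, 21, 22, 27, 28, 33, 34, 39, 40, 45, 46, 51, 52] := by
  decide

-- ===== VERDICT (by name: the statement is the Claim_ definition above) =====
theorem seat_position_spec : Claim_equal_seat_position := by
  intro seat _
  unfold Spec_seat_position
  by_cases h : 1 ≤ seat ∧ seat ≤ 54
  · obtain ⟨h1, h2⟩ := h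
    interval_cases seat <;> decide
  · have hw : seat ∉ pvWindowSeats := by
      rw [pvWindowSeats_eq]
      simp only [List.mem_cons, List.not_mem_nil, or_false]
      omega
    have hm : seat ∉ pvMiddleSeats := by
      rw [pvMiddleSeats_eq]
      simp only [List.mem_cons, List.not_mem_nil, or_false]
      omega
    have he : seat ∉ pvEdgeSeats := by
      rw [pvEdgeSeats_eq]
      simp only [List.mem_cons, List.not_mem_nil, or_false]
      omega
    simp [seat_position, seat_position_alt, hw, hm, he, h]
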